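-- pv_equiv track=rewrite | github.com/krishnapatel36/Don-t-say-13 | dont_say_13.py | computer_turn
-- ===== SOURCE A (Python) =====
-- def computer_turn(current_sum):
--     for i in range(1, 3):
--         if (current_sum + i) % 3 == 0 and current_sum + i <= 13:
--             return i
--     for i in range(1, 3):
--         if current_sum + i <= 13:
--             return i
--     return 1
-- ===== SOURCE B (Python) =====
-- def computer_turn(current_sum):
--     # Closed form: move 2 wins the mod-3 race when current_sum % 3 == 1 and it stays <= 13; otherwise say 1.
--     return 2 if current_sum % 3 == 1 and current_sum <= 11 else 1
-- ===== Notes on version B (the rewrite author's own statement) =====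
-- stated objective: simpler
-- what changed: Replaced the two sequential search loops with a single closed-form boolean condition (current_sum % 3 == 1 and current_sum <= 11) selecting the move directly.
import Mathlib
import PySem

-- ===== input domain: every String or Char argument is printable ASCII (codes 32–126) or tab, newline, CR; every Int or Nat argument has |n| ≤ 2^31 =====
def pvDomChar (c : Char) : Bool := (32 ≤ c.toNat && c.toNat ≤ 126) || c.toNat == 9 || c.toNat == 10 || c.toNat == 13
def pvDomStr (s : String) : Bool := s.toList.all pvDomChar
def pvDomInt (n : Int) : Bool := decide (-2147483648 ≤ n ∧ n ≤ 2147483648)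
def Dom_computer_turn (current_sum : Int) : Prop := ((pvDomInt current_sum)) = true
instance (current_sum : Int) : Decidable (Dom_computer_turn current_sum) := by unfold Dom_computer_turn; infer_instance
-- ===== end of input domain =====

-- B replaces A's two sequential search loops with a single closed-form condition (current_sum % 3 == 1 and current_sum <= 11) choosing the move directly; objective: simpler.
-- ===== PORT A =====
def computer_turn (current_sum : Int) : Int :=
  match (PySem.List.pyRange 1 3 1).find? (fun i => PySem.Int.mod (current_sum + i) 3 == 0 && decide (current_sum + i ≤ 13)) with
  | some i => i
  | none =>
    match (PySem.List.pyRange 1 3 1).find? (fun i => decide (current_sum + i ≤ 13)) with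
    | some i => i
    | none => 1

-- ===== PORT B =====
-- B: one closed-form condition, no loops.
def computer_turn_alt (current_sum : Int) : Int :=
  if PySem.Int.mod current_sum 3 == 1 && decide (current_sum ≤ 11) then 2 else 1

-- ===== PRECONDITION & SPEC =====
def Spec_computer_turn (current_sum : Int) (out : Int) : Prop := out = computer_turn_alt current_sum
instance (current_sum : Int) (out : Int) : Decidable (Spec_computer_turn current_sum out) := by unfold Spec_computer_turn; infer_instance

-- ===== CLAIM (what is proved, stated in full; the proofs are below) =====
def Claim_equal_computer_turn : Prop := ∀ (current_sum : Int), Dom_computer_turn current_sum → Spec_computer_turn current_sum (computer_turn current_sum)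

-- ===== LEMMAS AND PROOFS =====

-- ===== VERDICT (by name: the statement is the Claim_ definition above) =====
theorem computer_turn_spec : Claim_equal_computer_turn := by
  intro s _
  unfold Spec_computer_turn computer_turn computer_turn_alt
  have hr : PySem.List.pyRange 1 3 1 = [1, 2] := by decide
  rw [hr]
  simp only [List.find?, PySem.Int.mod_eq_emod_of_pos (by norm_num : (0:Int) < 3)]
  have h3 := Int.emod_emod_of_dvd s (by norm_num : (3:Int) ∣ 3)
  have h0 : 0 ≤ s % 3 := Int.emod_nonneg s (by norm_num)
  have h1 : s % 3 < 3 := Int.emod_lt_of_pos s (by norm_num)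
  have he1 : (s + 1) % 3 = (s % 3 + 1) % 3 := by omega
  have he2 : (s + 2) % 3 = (s % 3 + 2) % 3 := by omega
  interval_cases h : (s % 3) <;> simp only [he1, he2] <;>
    by_cases hc : s < 13 <;> by_cases hd : s + 2 ≤ 13 <;> by_cases hs : s ≤ 11 <;>
      first | omega | (simp [hc, hd, hs]; try omega)
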